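-- pv_equiv track=rewrite | github.com/renaudcepre/felix | src/felix/ingest/segmenter.py | _group_blocks
-- ===== SOURCE A (Python) =====
-- def _group_blocks(blocks: list[str], breakpoints: set[int]) -> list[list[str]]:
--     """Group consecutive blocks into segments, cutting at each breakpoint."""
--     segments: list[list[str]] = []
--     current: list[str] = []
--     for i, block in enumerate(blocks):
--         current.append(block)
--         if i in breakpoints:
--             segments.append(current)
--             current = []
--     if current:
--         segments.append(current)
--     return segments
-- ===== SOURCE B (Python) =====
-- def _group_blocks(blocks: list[str], breakpoints: set[int]) -> list[list[str]]:
--     """Group consecutive blocks into segments, cutting at each breakpoint."""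
--     n = len(blocks)
--     cuts = sorted(b for b in breakpoints if 0 <= b < n)
--     segments: list[list[str]] = []
--     start = 0
--     for c in cuts:
--         segments.append(blocks[start:c + 1])
--         start = c + 1
--     if start < n:
--         segments.append(blocks[start:])
--     return segments
-- ===== Notes on version B (the rewrite author's own statement) =====
-- stated objective: alternative
-- what changed: Instead of scanning block-by-block with a per-index set-membership test and an accumulator list, B precomputes the sorted in-range cut indices and emits each segment as one slice blocks[start:cut+1], then a final tail slice.
import Mathlib
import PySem

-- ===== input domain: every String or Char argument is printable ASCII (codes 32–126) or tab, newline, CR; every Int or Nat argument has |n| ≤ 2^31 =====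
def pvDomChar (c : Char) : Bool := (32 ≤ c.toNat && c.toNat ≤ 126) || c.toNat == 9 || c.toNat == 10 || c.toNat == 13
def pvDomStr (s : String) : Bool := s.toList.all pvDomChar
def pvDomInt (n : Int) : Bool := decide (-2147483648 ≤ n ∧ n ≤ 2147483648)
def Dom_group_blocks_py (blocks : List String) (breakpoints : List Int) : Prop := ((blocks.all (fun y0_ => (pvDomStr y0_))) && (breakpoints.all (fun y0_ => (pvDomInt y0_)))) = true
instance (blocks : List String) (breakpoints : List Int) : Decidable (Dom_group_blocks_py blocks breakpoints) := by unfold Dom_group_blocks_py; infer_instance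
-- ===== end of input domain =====

-- B replaces A's block-by-block scan (membership test at every index, accumulator list)
-- by slicing at the precomputed sorted in-range cut indices; equivalence proved for all inputs.

-- ===== PORT A =====
def group_blocks_py (blocks : List String) (breakpoints : List Int) : List (List String) :=
  let st := (PySem.List.enumerate blocks 0).foldl
    (fun (st : List (List String) × List String) (p : Int × String) =>
      let current := st.2 ++ [p.2]
      if breakpoints.contains p.1 then (st.1 ++ [current], ([] : List String))
      else (st.1, current))
    ([], [])
  if st.2.isEmpty then st.1 else st.1 ++ [st.2]

-- ===== PORT B =====
def group_blocks_py_alt (blocks : List String) (breakpoints : List Int) : List (List String) :=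
  let n : Int := blocks.length
  let cuts : List Int :=
    PySem.List.sorted ((PySem.Set.ofList breakpoints).filter (fun b => decide (0 ≤ b ∧ b < n)))
      (fun x => x) false
  let st := cuts.foldl
    (fun (st : List (List String) × Int) (c : Int) =>
      (st.1 ++ [PySem.List.slice blocks (some st.2) (some (c + 1))], c + 1))
    ([], 0)
  if st.2 < n then st.1 ++ [PySem.List.slice blocks (some st.2) none] else st.1

-- ===== PRECONDITION & SPEC =====
def Spec_group_blocks_py (blocks : List String) (breakpoints : List Int) (out : List (List String)) : Prop := out = group_blocks_py_alt blocks breakpoints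
instance (blocks : List String) (breakpoints : List Int) (out : List (List String)) : Decidable (Spec_group_blocks_py blocks breakpoints out) := by unfold Spec_group_blocks_py; infer_instance

-- ===== CLAIM (what is proved, stated in full; the proofs are below) =====
def Claim_equal_group_blocks_py : Prop := ∀ (blocks : List String) (breakpoints : List Int), Dom_group_blocks_py blocks breakpoints → Spec_group_blocks_py blocks breakpoints (group_blocks_py blocks breakpoints)

-- ===== LEMMAS AND PROOFS =====

/-- A's loop, as structural recursion: remaining blocks, current index, current segment. -/
def gRec (bp : List Int) : List String → Nat → List String → List (List String)
  | [], _, cur => if cur.isEmpty then [] else [cur]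
  | b :: bs, i, cur =>
    if bp.contains (i : Int) then (cur ++ [b]) :: gRec bp bs (i + 1) []
    else gRec bp bs (i + 1) (cur ++ [b])

/-- The in-range cut indices ≥ i, ascending (bs stands for blocks.drop i). -/
def cutsFrom (bp : List Int) : List String → Nat → List Int
  | [], _ => []
  | _ :: bs, i =>
    if bp.contains (i : Int) then (i : Int) :: cutsFrom bp bs (i + 1)
    else cutsFrom bp bs (i + 1)

/-- B's loop, as structural recursion over the cut list. -/
def hRec (blocks : List String) : List Int → Int → List (List String)
  | [], start =>
      if start < (blocks.length : Int) then [PySem.List.slice blocks (some start) none] else []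
  | c :: cs, start =>
      PySem.List.slice blocks (some start) (some (c + 1)) :: hRec blocks cs (c + 1)

theorem aLoop_eq (bp : List Int) : ∀ (bs : List String) (i : Nat) (segs : List (List String)) (cur : List String),
    (if ((PySem.List.enumerate bs (i : Int)).foldl
      (fun (st : List (List String) × List String) (p : Int × String) =>
        if bp.contains p.1 then (st.1 ++ [st.2 ++ [p.2]], ([] : List String))
        else (st.1, st.2 ++ [p.2]))
      (segs, cur)).2.isEmpty
     then ((PySem.List.enumerate bs (i : Int)).foldl
      (fun (st : List (List String) × List String) (p : Int × String) =>
        if bp.contains p.1 then (st.1 ++ [st.2 ++ [p.2]], ([] : List String))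
        else (st.1, st.2 ++ [p.2]))
      (segs, cur)).1
     else ((PySem.List.enumerate bs (i : Int)).foldl
      (fun (st : List (List String) × List String) (p : Int × String) =>
        if bp.contains p.1 then (st.1 ++ [st.2 ++ [p.2]], ([] : List String))
        else (st.1, st.2 ++ [p.2]))
      (segs, cur)).1 ++ [((PySem.List.enumerate bs (i : Int)).foldl
      (fun (st : List (List String) × List String) (p : Int × String) =>
        if bp.contains p.1 then (st.1 ++ [st.2 ++ [p.2]], ([] : List String))
        else (st.1, st.2 ++ [p.2]))
      (segs, cur)).2])
    = segs ++ gRec bp bs i cur := by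
  intro bs
  induction bs with
  | nil =>
      intro i segs cur
      simp only [PySem.List.enumerate_nil, List.foldl_nil, gRec]
      cases cur <;> simp
  | cons b bs ih =>
      intro i segs cur
      rw [PySem.List.enumerate_cons]
      simp only [List.foldl_cons]
      have hc : ((i : Int) + 1) = ((i + 1 : Nat) : Int) := by push_cast; ring
      by_cases h : bp.contains (i : Int)
      · simp only [if_pos h, hc, ih (i + 1), gRec]
        simp
      · simp only [if_neg h, hc, ih (i + 1), gRec]

theorem bLoop_eq (blocks : List String) : ∀ (cs : List Int) (start : Int) (res : List (List String)),
    (if (cs.foldl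
      (fun (st : List (List String) × Int) (c : Int) =>
        (st.1 ++ [PySem.List.slice blocks (some st.2) (some (c + 1))], c + 1))
      (res, start)).2 < (blocks.length : Int)
     then (cs.foldl
      (fun (st : List (List String) × Int) (c : Int) =>
        (st.1 ++ [PySem.List.slice blocks (some st.2) (some (c + 1))], c + 1))
      (res, start)).1 ++ [PySem.List.slice blocks (some (cs.foldl
      (fun (st : List (List String) × Int) (c : Int) =>
        (st.1 ++ [PySem.List.slice blocks (some st.2) (some (c + 1))], c + 1))
      (res, start)).2) none]
     else (cs.foldl
      (fun (st : List (List String) × Int) (c : Int) =>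
        (st.1 ++ [PySem.List.slice blocks (some st.2) (some (c + 1))], c + 1))
      (res, start)).1)
    = res ++ hRec blocks cs start := by
  intro cs
  induction cs with
  | nil =>
      intro start res
      simp only [List.foldl_nil, hRec]
      split <;> simp
  | cons c cs ih =>
      intro start res
      simp only [List.foldl_cons, hRec]
      rw [ih]
      simp

theorem mem_cutsFrom (bp : List Int) : ∀ (bs : List String) (i : Nat) (x : Int),
    x ∈ cutsFrom bp bs i ↔ ((i : Int) ≤ x ∧ x < (i : Int) + bs.length ∧ x ∈ bp) := by
  intro bs
  induction bs with
  | nil =>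
      intro i x
      simp only [cutsFrom, List.not_mem_nil, List.length_nil, Nat.cast_zero, add_zero, false_iff]
      rintro ⟨h1, h2, -⟩
      omega
  | cons b bs ih =>
      intro i x
      simp only [cutsFrom, List.length_cons]
      by_cases h : bp.contains (i : Int)
      · have hib : (i : Int) ∈ bp := by simpa using h
        rw [if_pos h]
        simp only [List.mem_cons, ih]
        push_cast
        constructor
        · rintro (rfl | ⟨h1, h2, h3⟩)
          · exact ⟨le_refl _, by omega, hib⟩
          · exact ⟨by omega, by omega, h3⟩
        · rintro ⟨h1, h2, h3⟩
          rcases eq_or_lt_of_le h1 with heq | hlt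
          · exact Or.inl heq.symm
          · exact Or.inr ⟨by omega, by omega, h3⟩
      · rw [if_neg h]
        rw [ih]
        push_cast
        constructor
        · rintro ⟨h1, h2, h3⟩
          exact ⟨by omega, by omega, h3⟩
        · rintro ⟨h1, h2, h3⟩
          have hx : x ≠ (i : Int) := by
            rintro rfl
            exact h (by simpa using h3)
          exact ⟨by omega, by omega, h3⟩

theorem pairwise_cutsFrom (bp : List Int) : ∀ (bs : List String) (i : Nat),
    (cutsFrom bp bs i).Pairwise (· < ·) := by
  intro bs
  induction bs with
  | nil => intro i; simp [cutsFrom]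
  | cons b bs ih =>
      intro i
      simp only [cutsFrom]
      by_cases h : bp.contains (i : Int)
      · rw [if_pos h]
        refine List.Pairwise.cons ?_ (ih (i + 1))
        intro y hy
        have := ((mem_cutsFrom bp bs (i + 1) y).1 hy).1
        push_cast at this ⊢
        omega
      · rw [if_neg h]
        exact ih (i + 1)

/-- A's scan over blocks, started anywhere, equals B's slicing over the remaining cuts. -/
theorem main_lemma (bp : List Int) (blocks : List String) :
    ∀ (bs : List String) (i start : Nat), start ≤ i → blocks.drop i = bs →
    gRec bp bs i ((blocks.drop start).take (i - start))
      = hRec blocks (cutsFrom bp bs i) (start : Int) := by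
  intro bs
  induction bs with
  | nil =>
      intro i start hle hdrop
      have hn : blocks.length ≤ i := by
        have := List.drop_eq_nil_iff.mp hdrop
        omega
      have hcur : (blocks.drop start).take (i - start) = blocks.drop start := by
        apply List.take_of_length_le
        simp
        omega
      simp only [gRec, cutsFrom, hRec, hcur]
      by_cases hs : start < blocks.length
      · have hne : ¬ (blocks.drop start).isEmpty := by
          simp [List.isEmpty_iff, List.drop_eq_nil_iff]
          omega
        rw [if_neg hne, if_pos (by exact_mod_cast hs)]
        rw [PySem.List.slice_from_natCast]
      · have he : (blocks.drop start).isEmpty := by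
          simp [List.isEmpty_iff, List.drop_eq_nil_iff]
          omega
        rw [if_pos he, if_neg (by exact_mod_cast hs)]
  | cons b bs ih =>
      intro i start hle hdrop
      have hi : i < blocks.length := by
        by_contra hni
        rw [List.drop_eq_nil_iff.mpr (by omega)] at hdrop
        exact List.cons_ne_nil b bs hdrop.symm
      have hdrop' : blocks.drop (i + 1) = bs := by
        have := congrArg (List.drop 1) hdrop
        simpa [List.drop_drop, Nat.add_comm] using this
      have hget : blocks[i]? = some b := by
        have h0 : (List.drop i blocks)[0]? = blocks[i + 0]? := List.getElem?_drop
        rw [hdrop] at h0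
        simpa using h0.symm
      have hcur : (blocks.drop start).take (i - start) ++ [b]
          = (blocks.drop start).take (i + 1 - start) := by
        have harith : i + 1 - start = (i - start) + 1 := by omega
        rw [harith, List.take_add_one]
        have hh : (List.drop start blocks)[i - start]? = blocks[start + (i - start)]? :=
          List.getElem?_drop
        rw [show start + (i - start) = i from by omega] at hh
        rw [hh, hget]
        rfl
      simp only [gRec, cutsFrom]
      by_cases h : bp.contains (i : Int)
      · rw [if_pos h, if_pos h]
        simp only [hRec]
        congr 1
        · rw [show (i : Int) + 1 = ((i + 1 : Nat) : Int) from by push_cast; ring,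
            PySem.List.slice_natCast, ← hcur]
        · have hih := ih (i + 1) (i + 1) (le_refl _) hdrop'
          simpa using hih
      · rw [if_neg h, if_neg h]
        have hih := ih (i + 1) start (by omega) hdrop'
        rw [← hcur] at hih
        exact hih

theorem cuts_eq (bp : List Int) (blocks : List String) :
    PySem.List.sorted ((PySem.Set.ofList bp).filter
        (fun b => decide (0 ≤ b ∧ b < (blocks.length : Int)))) (fun x => x) false
      = cutsFrom bp blocks 0 := by
  apply PySem.List.sorted_eq_of_perm_of_pairwise_lt
  · refine (List.perm_ext_iff_of_nodup ?_ ?_).mpr ?_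
    · exact (pairwise_cutsFrom bp blocks 0).imp ne_of_lt
    · exact (PySem.Set.nodup_ofList bp).filter _
    · intro x
      rw [mem_cutsFrom, List.mem_filter, PySem.Set.mem_ofList]
      simp only [decide_eq_true_eq, Nat.cast_zero, zero_add]
      tauto
  · simpa using pairwise_cutsFrom bp blocks 0

-- ===== VERDICT (by name: the statement is the Claim_ definition above) =====
theorem group_blocks_py_spec : Claim_equal_group_blocks_py := by
  intro blocks bp _
  unfold Spec_group_blocks_py group_blocks_py group_blocks_py_alt
  simp only []
  have hA := aLoop_eq bp blocks 0 [] []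
  simp only [Nat.cast_zero, List.nil_append] at hA
  have hB := bLoop_eq blocks (cutsFrom bp blocks 0) 0 []
  simp only [List.nil_append] at hB
  have hM := main_lemma bp blocks blocks 0 0 (le_refl 0) (by simp)
  simp only [List.drop_zero, List.take_zero, Nat.cast_zero, Nat.sub_zero] at hM
  rw [hA, cuts_eq bp blocks, hB, hM]
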